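-- pv_equiv track=rewrite | github.com/InderdeepSync/algoexpert_problems | two_edge_connected_graph.py | no_disjoint_sets
-- ===== SOURCE A (Python) =====
-- def no_disjoint_sets(set_list):
--     for i in range(len(set_list) - 1):
--         flag = True
--         for j in range(i + 1, len(set_list)):
--             if not set_list[i].isdisjoint(set_list[j]):
--                 flag = False
--         if flag:
--             return False
--
--     return True
-- ===== SOURCE B (Python) =====
-- def no_disjoint_sets(set_list):
--     # Single backward pass: a set is disjoint from every later set iff it is
--     # disjoint from the union of all later sets, accumulated in `seen`.
--     if not set_list:
--         return True
--     seen = set(set_list[-1])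
--     for s in reversed(set_list[:-1]):
--         if s.isdisjoint(seen):
--             return False
--         seen |= s
--     return True
-- ===== Notes on version B (the rewrite author's own statement) =====
-- stated objective: faster
-- what changed: Replaces the nested pairwise disjointness scan with one backward pass that keeps a running union of the later sets and tests each set against that union once.
import Mathlib
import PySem

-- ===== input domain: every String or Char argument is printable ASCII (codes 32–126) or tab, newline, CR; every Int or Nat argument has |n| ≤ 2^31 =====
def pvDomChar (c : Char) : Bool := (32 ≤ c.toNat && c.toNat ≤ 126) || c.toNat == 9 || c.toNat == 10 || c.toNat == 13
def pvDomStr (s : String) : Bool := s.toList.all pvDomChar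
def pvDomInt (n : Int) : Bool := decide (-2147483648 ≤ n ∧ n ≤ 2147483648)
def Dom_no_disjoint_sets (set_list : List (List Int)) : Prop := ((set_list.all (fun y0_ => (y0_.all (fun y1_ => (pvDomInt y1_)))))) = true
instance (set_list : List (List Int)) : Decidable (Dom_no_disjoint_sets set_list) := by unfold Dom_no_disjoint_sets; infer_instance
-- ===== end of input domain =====

-- B replaces A's nested pairwise disjointness scan with one backward pass against a
-- running union of the later sets (objective: faster).

-- ===== PORT A =====
-- inner loop: for j in range(i+1, len): if not set_list[i].isdisjoint(set_list[j]): flag = False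
def pvAInner (set_list : List (List Int)) (i : Int) : Bool :=
  (PySem.List.pyRange (i + 1) (set_list.length : Int) 1).foldl
    (fun flag j =>
      if !(PySem.Set.isdisjoint (PySem.List.pyGetD set_list i [])
            (PySem.List.pyGetD set_list j [])) then false else flag)
    true

-- outer loop with early return False
def pvALoop (set_list : List (List Int)) : List Int → Bool
  | [] => true
  | i :: is => if pvAInner set_list i then false else pvALoop set_list is

def no_disjoint_sets (set_list : List (List Int)) : Bool :=
  pvALoop set_list (PySem.List.pyRange 0 ((set_list.length : Int) - 1) 1)

-- ===== PORT B =====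
-- for s in reversed(set_list[:-1]): if s.isdisjoint(seen): return False; seen |= s
def pvBLoop : List (List Int) → PySem.Set Int → Bool
  | [], _ => true
  | s :: rest, seen =>
      if PySem.Set.isdisjoint (PySem.Set.ofList s) seen then false
      else pvBLoop rest (PySem.Set.update seen s)

def no_disjoint_sets_alt (set_list : List (List Int)) : Bool :=
  match set_list.reverse with
  | [] => true
  | lastS :: restRev => pvBLoop restRev (PySem.Set.ofList lastS)

-- ===== PRECONDITION & SPEC =====
def Spec_no_disjoint_sets (set_list : List (List Int)) (out : Bool) : Prop := out = no_disjoint_sets_alt set_list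
instance (set_list : List (List Int)) (out : Bool) : Decidable (Spec_no_disjoint_sets set_list out) := by unfold Spec_no_disjoint_sets; infer_instance

-- ===== CLAIM (what is proved, stated in full; the proofs are below) =====
def Claim_equal_no_disjoint_sets : Prop := ∀ (set_list : List (List Int)), Dom_no_disjoint_sets set_list → Spec_no_disjoint_sets set_list (no_disjoint_sets set_list)

-- ===== LEMMAS AND PROOFS =====

-- common structural reference: process the list front to back; a set that is disjoint
-- from every later set (and has a later set) makes the answer false
def pvSpec : List (List Int) → Bool
  | [] => true
  | s :: rest =>
      if rest.isEmpty then true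
      else if rest.all (fun t => PySem.Set.isdisjoint s t) then false
      else pvSpec rest

-- the flag fold is an 'all' over the scanned indices
lemma pvFold_flag (c : Int → Bool) (js : List Int) (b : Bool) :
    js.foldl (fun flag j => if !(c j) then false else flag) b = (b && js.all c) := by
  induction js generalizing b with
  | nil => simp
  | cons j js ih =>
      simp only [List.foldl_cons, List.all_cons, ih]
      cases c j <;> simp

lemma pvAInner_eq (l : List (List Int)) (i : Nat) (h : i < l.length) :
    pvAInner l (i : Int) = (l.drop (i + 1)).all (fun t => PySem.Set.isdisjoint l[i] t) := by
  unfold pvAInner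
  rw [pvFold_flag, Bool.true_and]
  have hcast : ((i : Int) + 1) = ((i + 1 : Nat) : Int) := by push_cast; ring
  have hmap := PySem.List.map_pyGetD_pyRange (xs := l) (a := ((i + 1 : Nat) : Int))
    (d := ([] : List Int)) (by positivity)
  simp only [PySem.List.len_eq, Int.toNat_natCast] at hmap
  rw [hcast, ← hmap, List.all_map]
  simp [Function.comp_def, PySem.List.pyGetD_natCast, List.getD, List.getElem?_eq_getElem h]

lemma pvALoop_eq (l : List (List Int)) (k : Nat) (hk : k ≤ l.length) :
    pvALoop l (PySem.List.pyRange (k : Int) ((l.length : Int) - 1) 1) = pvSpec (l.drop k) := by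
  by_cases hlt : (k : Int) < (l.length : Int) - 1
  · have hklen : k < l.length := by omega
    have hk1 : k + 1 ≤ l.length := by omega
    rw [PySem.List.pyRange_one_cons hlt]
    have hdrop : l.drop k = l[k] :: l.drop (k + 1) := List.drop_eq_getElem_cons hklen
    have hrest : (l.drop (k + 1)).isEmpty = false := by
      have : l.drop (k + 1) ≠ [] := by
        simp only [ne_eq, List.drop_eq_nil_iff]
        omega
      simpa using this
    simp only [pvALoop, pvAInner_eq l k hklen, hdrop, pvSpec, hrest]
    have hcast : ((k : Int) + 1) = ((k + 1 : Nat) : Int) := by push_cast; ring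
    rw [hcast, pvALoop_eq l (k + 1) hk1]
    simp
    try rfl
  · rw [PySem.List.pyRange_one_eq_nil (by omega)]
    have hk' : l.length ≤ k + 1 := by omega
    rcases hd : l.drop k with _ | ⟨s, rest⟩
    · simp [pvALoop, pvSpec]
    · have : rest = [] := by
        have hlen := congrArg List.length hd
        simp only [List.length_drop, List.length_cons] at hlen
        have : rest.length = 0 := by omega
        simpa [List.length_eq_zero_iff] using this
      simp [pvALoop, pvSpec, this]
termination_by l.length - k

-- membership of the accumulated union
lemma pvMem_foldUpd (xs : List (List Int)) (seen : PySem.Set Int) (y : Int) :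
    y ∈ xs.foldl (fun acc t => PySem.Set.update acc t) seen ↔ y ∈ seen ∨ ∃ t ∈ xs, y ∈ t := by
  induction xs generalizing seen with
  | nil => simp
  | cons t xs ih =>
      simp only [List.foldl_cons, ih, PySem.Set.mem_update, List.mem_cons]
      aesop

lemma pvBLoop_append (xs ys : List (List Int)) (seen : PySem.Set Int) :
    pvBLoop (xs ++ ys) seen =
      if pvBLoop xs seen then pvBLoop ys (xs.foldl (fun acc t => PySem.Set.update acc t) seen)
      else false := by
  induction xs generalizing seen with
  | nil => simp [pvBLoop]
  | cons s xs ih =>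
      simp only [List.cons_append, pvBLoop, List.foldl_cons]
      split
      · rfl
      · exact ih _

-- disjoint-from-union = disjoint-from-each
lemma pvDisj_union (s lastS : List Int) (rest : List (List Int)) :
    PySem.Set.isdisjoint (PySem.Set.ofList s)
      (rest.reverse.foldl (fun acc t => PySem.Set.update acc t) (PySem.Set.ofList lastS))
    = (rest ++ [lastS]).all (fun t => PySem.Set.isdisjoint s t) := by
  rw [Bool.eq_iff_iff]
  simp only [PySem.Set.isdisjoint_iff, List.all_eq_true, pvMem_foldUpd,
    PySem.Set.mem_ofList, List.mem_append, List.mem_singleton, List.mem_reverse]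
  aesop

lemma pvBLoop_eq (lastS : List Int) (init : List (List Int)) :
    pvBLoop init.reverse (PySem.Set.ofList lastS) = pvSpec (init ++ [lastS]) := by
  induction init with
  | nil => simp [pvBLoop, pvSpec]
  | cons s rest ih =>
      rw [List.reverse_cons, pvBLoop_append, ih]
      have hne : ((rest ++ [lastS]) : List (List Int)).isEmpty = false := by
        simp
      show (if pvSpec (rest ++ [lastS]) then pvBLoop [s] _ else false) = _
      simp only [pvBLoop, pvDisj_union s lastS rest]
      simp only [List.cons_append, pvSpec, hne]
      cases pvSpec (rest ++ [lastS]) <;> cases (rest ++ [lastS]).all (fun t => PySem.Set.isdisjoint s t) <;> simp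

lemma pvA_eq_spec (l : List (List Int)) : no_disjoint_sets l = pvSpec l := by
  have := pvALoop_eq l 0 (Nat.zero_le _)
  simpa [no_disjoint_sets] using this

lemma pvB_eq_spec (l : List (List Int)) : no_disjoint_sets_alt l = pvSpec l := by
  rcases List.eq_nil_or_concat l with rfl | ⟨init, lastS, rfl⟩
  · rfl
  · have hrev : (init ++ [lastS]).reverse = lastS :: init.reverse := by simp
    simp only [List.concat_eq_append, no_disjoint_sets_alt, hrev]
    exact pvBLoop_eq lastS init

-- ===== VERDICT (by name: the statement is the Claim_ definition above) =====
theorem no_disjoint_sets_spec : Claim_equal_no_disjoint_sets := by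
  intro l _
  unfold Spec_no_disjoint_sets
  rw [pvA_eq_spec, pvB_eq_spec]
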